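-- pv_equiv track=rewrite | github.com/dxsbiocc/omiga | .omiga/plugins/computer-use/bin/computer-use-macos.py | direct_type_script
-- ===== SOURCE A (Python) =====
-- MAX_DIRECT_TYPE_CHARS = 512
--
-- def applescript_quote(value: str) -> str:
--     return '"' + value.replace("\\", "\\\\").replace('"', '\\"') + '"'
--
-- def direct_type_supported(text: str) -> bool:
--     if len(text) > MAX_DIRECT_TYPE_CHARS:
--         return False
--     return all(ch in {"\n", "\t"} or ord(ch) >= 32 for ch in text)
--
-- def direct_type_script(text: str) -> str | None:
--     if not direct_type_supported(text):
--         return None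
--     lines = ['tell application "System Events"']
--     chunk: list[str] = []
--
--     def flush_chunk() -> None:
--         if chunk:
--             lines.append(f"keystroke {applescript_quote(''.join(chunk))}")
--             chunk.clear()
--
--     for ch in text:
--         if ch == "\n":
--             flush_chunk()
--             lines.append("key code 36")
--         elif ch == "\t":
--             flush_chunk()
--             lines.append("key code 48")
--         else:
--             chunk.append(ch)
--     flush_chunk()
--     lines.append("end tell")
--     return "\n".join(lines)
-- ===== SOURCE B (Python) =====
-- MAX_DIRECT_TYPE_CHARS = 512
--
-- def applescript_quote(value: str) -> str:
--     return '"' + value.replace("\\", "\\\\").replace('"', '\\"') + '"'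
--
-- def direct_type_supported(text: str) -> bool:
--     if len(text) > MAX_DIRECT_TYPE_CHARS:
--         return False
--     return all(ch in {"\n", "\t"} or ord(ch) >= 32 for ch in text)
--
-- def direct_type_script(text: str) -> str | None:
--     if not direct_type_supported(text):
--         return None
--     body: list[str] = []
--     for i, line in enumerate(text.split("\n")):
--         if i:
--             body.append("key code 36")
--         for j, piece in enumerate(line.split("\t")):
--             if j:
--                 body.append("key code 48")
--             if piece:
--                 body.append(f"keystroke {applescript_quote(piece)}")
--     return "\n".join(['tell application "System Events"'] + body + ["end tell"])
-- ===== Notes on version B (the rewrite author's own statement) =====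
-- stated objective: simpler
-- what changed: Replaces A's character-by-character state machine with its pending-chunk buffer and inner flush closure by a two-level split on newline and tab that emits key codes between segments and one keystroke line per non-empty piece.
import Mathlib
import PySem

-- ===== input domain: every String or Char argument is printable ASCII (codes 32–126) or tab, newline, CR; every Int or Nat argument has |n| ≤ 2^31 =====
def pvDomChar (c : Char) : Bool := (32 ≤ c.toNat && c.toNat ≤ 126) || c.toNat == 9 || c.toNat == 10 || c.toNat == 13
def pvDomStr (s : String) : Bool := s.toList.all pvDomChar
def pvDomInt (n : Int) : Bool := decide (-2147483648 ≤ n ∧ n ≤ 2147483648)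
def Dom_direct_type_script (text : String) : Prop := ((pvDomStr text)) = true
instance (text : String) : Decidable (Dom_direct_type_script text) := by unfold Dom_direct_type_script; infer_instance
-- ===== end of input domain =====

-- B replaces A's character state machine (pending chunk + flush closure) by a two-level
-- split on '\n' / '\t' emitting key codes between segments; objective: simpler.

-- ===== PORT A =====
-- shared helper: applescript_quote (identical in A and B)
def pvQuote (value : String) : String :=
  "\"" ++ PySem.Str.replace (PySem.Str.replace value "\\" "\\\\") "\"" "\\\"" ++ "\""

-- shared helper: direct_type_supported (identical in A and B)
def pvSupported (text : String) : Bool :=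
  if PySem.Str.len text > 512 then false
  else text.toList.all (fun ch => (ch == '\n' || ch == '\t') || decide (32 ≤ ch.toNat))

-- flush_chunk: append a keystroke line if the chunk is non-empty (chunk becomes [])
def pvFlushA (lines : List String) (chunk : List Char) : List String :=
  if chunk.isEmpty then lines else lines ++ ["keystroke " ++ pvQuote (String.ofList chunk)]

-- the body of A's for-loop over characters, state = (lines, chunk)
def pvStepA (st : List String × List Char) (ch : Char) : List String × List Char :=
  if ch == '\n' then (pvFlushA st.1 st.2 ++ ["key code 36"], [])
  else if ch == '\t' then (pvFlushA st.1 st.2 ++ ["key code 48"], [])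
  else (st.1, st.2 ++ [ch])

def direct_type_script (text : String) : Option String :=
  if !(pvSupported text) then none
  else
    let st := text.toList.foldl pvStepA (["tell application \"System Events\""], ([] : List Char))
    some (PySem.Str.join "\n" (pvFlushA st.1 st.2 ++ ["end tell"]))

-- ===== PORT B =====
-- 'if piece: body.append(keystroke …)': zero or one line for a piece
def pvPiece (piece : List Char) : List String :=
  if piece.isEmpty then [] else ["keystroke " ++ pvQuote (String.ofList piece)]

-- inner loop: pieces of a line split on '\t', 'key code 48' before every piece but the first
def pvLineB (line : List Char) : List String :=
  match List.splitOn '\t' line with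
  | [] => []
  | p :: ps => pvPiece p ++ ps.flatMap (fun q => "key code 48" :: pvPiece q)

-- outer loop: lines split on '\n', 'key code 36' before every line but the first
def pvBodyB (cs : List Char) : List String :=
  match List.splitOn '\n' cs with
  | [] => []
  | l :: ls => pvLineB l ++ ls.flatMap (fun m => "key code 36" :: pvLineB m)

def direct_type_script_alt (text : String) : Option String :=
  if !(pvSupported text) then none
  else some (PySem.Str.join "\n"
    ("tell application \"System Events\"" :: pvBodyB text.toList ++ ["end tell"]))

-- ===== PRECONDITION & SPEC =====
def Spec_direct_type_script (text : String) (out : Option String) : Prop := out = direct_type_script_alt text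
instance (text : String) (out : Option String) : Decidable (Spec_direct_type_script text out) := by unfold Spec_direct_type_script; infer_instance

-- ===== CLAIM (what is proved, stated in full; the proofs are below) =====
def Claim_equal_direct_type_script : Prop := ∀ (text : String), Dom_direct_type_script text → Spec_direct_type_script text (direct_type_script text)

-- ===== LEMMAS AND PROOFS =====

-- middle form: A's loop written as structural recursion on the remaining characters
def pvMid : List Char → List Char → List String
  | [], chunk => pvPiece chunk
  | c :: t, chunk =>
    if c == '\n' then pvPiece chunk ++ "key code 36" :: pvMid t []
    else if c == '\t' then pvPiece chunk ++ "key code 48" :: pvMid t []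
    else pvMid t (chunk ++ [c])

theorem pvFlushA_eq (lines : List String) (chunk : List Char) :
    pvFlushA lines chunk = lines ++ pvPiece chunk := by
  unfold pvFlushA pvPiece
  by_cases h : chunk.isEmpty <;> simp [h]

theorem pvFoldA_eq (cs : List Char) (lines : List String) (chunk : List Char) :
    pvFlushA (cs.foldl pvStepA (lines, chunk)).1 (cs.foldl pvStepA (lines, chunk)).2
      = lines ++ pvMid cs chunk := by
  induction cs generalizing lines chunk with
  | nil => simp [pvMid, pvFlushA_eq]
  | cons c t ih =>
    simp only [List.foldl_cons, pvStepA, pvMid]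
    by_cases h1 : c == '\n'
    · simp [h1, ih, pvFlushA_eq]
    · by_cases h2 : c == '\t'
      · simp [h1, h2, ih, pvFlushA_eq]
      · simp [h1, h2, ih]

-- pvLineB / pvBodyB generalized by a prefix glued onto the first piece
def pvLineAux (chunk l : List Char) : List String :=
  match List.splitOn '\t' l with
  | [] => []
  | p :: ps => pvPiece (chunk ++ p) ++ ps.flatMap (fun q => "key code 48" :: pvPiece q)

def pvBodyAux (chunk cs : List Char) : List String :=
  match List.splitOn '\n' cs with
  | [] => []
  | l :: ls => pvLineAux chunk l ++ ls.flatMap (fun m => "key code 36" :: pvLineB m)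

theorem pvLineAux_nil (l : List Char) : pvLineAux [] l = pvLineB l := by
  unfold pvLineAux pvLineB
  cases List.splitOn '\t' l <;> simp

theorem pvBodyAux_nil (cs : List Char) : pvBodyAux [] cs = pvBodyB cs := by
  unfold pvBodyAux pvBodyB
  cases List.splitOn '\n' cs <;> simp [pvLineAux_nil]

theorem pvMid_eq (cs : List Char) (chunk : List Char) :
    pvMid cs chunk = pvBodyAux chunk cs := by
  induction cs generalizing chunk with
  | nil => simp [pvMid, pvBodyAux, pvLineAux, List.splitOn]
  | cons c t ih =>
    obtain ⟨l, ls, hn⟩ : ∃ l ls, List.splitOnP (fun x => x == '\n') t = l :: ls := by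
      cases h : List.splitOnP (fun x => x == '\n') t with
      | nil => exact absurd h (List.splitOnP_ne_nil _ t)
      | cons l ls => exact ⟨l, ls, rfl⟩
    obtain ⟨p, ps, ht⟩ : ∃ p ps, List.splitOnP (fun x => x == '\t') l = p :: ps := by
      cases h : List.splitOnP (fun x => x == '\t') l with
      | nil => exact absurd h (List.splitOnP_ne_nil _ l)
      | cons p ps => exact ⟨p, ps, rfl⟩
    by_cases h1 : c == '\n'
    · have hc : c = '\n' := by simpa using h1
      simp [pvMid, ih, pvBodyAux, pvLineAux, pvLineB, List.splitOn,
            List.splitOnP_cons, hc, hn, ht]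
    · by_cases h2 : c == '\t'
      · have hc : c = '\t' := by simpa using h2
        simp [pvMid, ih, pvBodyAux, pvLineAux, pvLineB, List.splitOn,
              List.splitOnP_cons, hc, hn, ht]
      · simp [pvMid, h1, h2, ih, pvBodyAux, pvLineAux, pvLineB, List.splitOn,
              List.splitOnP_cons, hn, ht]

-- ===== VERDICT (by name: the statement is the Claim_ definition above) =====
theorem direct_type_script_spec : Claim_equal_direct_type_script := by
  intro text _
  unfold Spec_direct_type_script direct_type_script direct_type_script_alt
  by_cases h : pvSupported text
  · simp only [h, Bool.not_true]
    have := pvFoldA_eq text.toList ["tell application \"System Events\""] []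
    rw [this, pvMid_eq, pvBodyAux_nil]
    simp
  · simp [h]
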